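-- pv_equiv track=rewrite | github.com/fariasigorsilva-cloud/robo-dados-basicos | robo_sapiens.py | _extrair_partes
-- ===== SOURCE A (Python) =====
-- def _extrair_partes(proc_jud: dict) -> str:
--     """Monta string 'Polo Ativo x Polo Passivo' a partir do processo judicial."""
--     try:
--         partes = proc_jud.get("partes") or []
--         ativos   = [p.get("nome","") for p in partes if (p.get("polo") or "").upper() == "AT"]
--         passivos = [p.get("nome","") for p in partes if (p.get("polo") or "").upper() == "PA"]
--         ativo    = ", ".join(filter(None, ativos))   or "N/D"
--         passivo  = ", ".join(filter(None, passivos)) or "N/D"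
--         return f"{ativo} x {passivo}"
--     except Exception:
--         return "N/D"
-- ===== SOURCE B (Python) =====
-- def _extrair_partes(proc_jud: dict) -> str:
--     """Monta string 'Polo Ativo x Polo Passivo' a partir do processo judicial."""
--     try:
--         ativo = ""
--         passivo = ""
--         for p in (proc_jud.get("partes") or []):
--             nome = p.get("nome", "")
--             if not nome:
--                 continue
--             polo = (p.get("polo") or "").upper()
--             if polo == "AT":
--                 ativo = nome if not ativo else ativo + ", " + nome
--             elif polo == "PA":
--                 passivo = nome if not passivo else passivo + ", " + nome
--         return f"{ativo or 'N/D'} x {passivo or 'N/D'}"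
--     except Exception:
--         return "N/D"
-- ===== Notes on version B (the rewrite author's own statement) =====
-- stated objective: alternative
-- what changed: Replaces A's two filter-comprehension passes plus ', '.join staged pipeline by a single for-loop over partes that grows the ativo/passivo result strings incrementally in two string accumulators (no intermediate lists, no join).
import Mathlib
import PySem

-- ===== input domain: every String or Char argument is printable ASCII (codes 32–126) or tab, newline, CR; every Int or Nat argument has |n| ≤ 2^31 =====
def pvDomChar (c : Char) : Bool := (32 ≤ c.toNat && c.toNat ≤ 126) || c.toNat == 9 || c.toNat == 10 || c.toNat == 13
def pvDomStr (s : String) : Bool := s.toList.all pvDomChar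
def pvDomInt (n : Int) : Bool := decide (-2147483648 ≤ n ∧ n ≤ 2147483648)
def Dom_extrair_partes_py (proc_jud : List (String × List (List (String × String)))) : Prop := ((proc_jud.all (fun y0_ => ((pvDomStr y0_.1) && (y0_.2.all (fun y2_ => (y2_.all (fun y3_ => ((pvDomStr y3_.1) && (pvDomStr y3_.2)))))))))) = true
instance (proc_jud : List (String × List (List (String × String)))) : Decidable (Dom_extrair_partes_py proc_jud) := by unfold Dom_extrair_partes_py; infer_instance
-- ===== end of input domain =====

-- B replaces A's two filter-comprehensions + ", ".join passes by ONE loop over the parties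
-- that grows the two result strings incrementally (no intermediate lists, no join);
-- same O(n) cost, a different decomposition (alternative).
-- Neither program can hit the except branch on well-typed input, so no Pre_ is needed.

-- ===== PORT A =====
-- p.get("polo") or "" : values are strings, so `or ""` only matters when the value is
-- already "" (falsy), where it returns "" again — getD "" is exact.
def pvPoloA (p : List (String × String)) : String :=
  PySem.Str.upper (((PySem.Dict.mk p).get? "polo").getD "")

def pvNomeA (p : List (String × String)) : String :=
  ((PySem.Dict.mk p).get? "nome").getD ""

-- ", ".join(filter(None, xs)) or "N/D"  (filter(None, ·) on strings drops exactly "")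
def pvJoinOrND_A (xs : List String) : String :=
  let j := PySem.Str.join ", " (xs.filter (fun s => s ≠ ""))
  if j = "" then "N/D" else j

def extrair_partes_py (proc_jud : List (String × List (List (String × String)))) : String :=
  -- proc_jud.get("partes") or [] : `or []` only fires on None or [], both giving [] — getD [] is exact
  let partes := ((PySem.Dict.mk proc_jud).get? "partes").getD []
  let ativos := (partes.filter (fun p => pvPoloA p == "AT")).map pvNomeA
  let passivos := (partes.filter (fun p => pvPoloA p == "PA")).map pvNomeA
  let ativo := pvJoinOrND_A ativos
  let passivo := pvJoinOrND_A passivos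
  ativo ++ " x " ++ passivo

-- ===== PORT B =====
-- `ativo = nome if not ativo else ativo + ", " + nome`
def pvExtB (s nome : String) : String := if s = "" then nome else s ++ ", " ++ nome

-- one iteration of B's for-loop over the (ativo, passivo) accumulator pair
def pvStepB (acc : String × String) (p : List (String × String)) : String × String :=
  let nome := ((PySem.Dict.mk p).get? "nome").getD ""
  if nome = "" then acc          -- `if not nome: continue`
  else
    let polo := PySem.Str.upper (((PySem.Dict.mk p).get? "polo").getD "")
    if polo = "AT" then (pvExtB acc.1 nome, acc.2)
    else if polo = "PA" then (acc.1, pvExtB acc.2 nome)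
    else acc

def extrair_partes_py_alt (proc_jud : List (String × List (List (String × String)))) : String :=
  let partes := ((PySem.Dict.mk proc_jud).get? "partes").getD []
  let r := partes.foldl pvStepB ("", "")
  (if r.1 = "" then "N/D" else r.1) ++ " x " ++ (if r.2 = "" then "N/D" else r.2)

-- ===== PRECONDITION & SPEC =====
def Spec_extrair_partes_py (proc_jud : List (String × List (List (String × String)))) (out : String) : Prop := out = extrair_partes_py_alt proc_jud
instance (proc_jud : List (String × List (List (String × String)))) (out : String) : Decidable (Spec_extrair_partes_py proc_jud out) := by unfold Spec_extrair_partes_py; infer_instance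

-- ===== CLAIM (what is proved, stated in full; the proofs are below) =====
def Claim_equal_extrair_partes_py : Prop := ∀ (proc_jud : List (String × List (List (String × String)))), Dom_extrair_partes_py proc_jud → Spec_extrair_partes_py proc_jud (extrair_partes_py proc_jud)

-- ===== LEMMAS AND PROOFS =====

-- the nonempty names of the parties whose (normalized) polo is k, in order
def pvNames (k : String) (partes : List (List (String × String))) : List String :=
  ((partes.filter (fun p => pvPoloA p == k)).map pvNomeA).filter (fun s => s ≠ "")

theorem pvExtB_ne_empty (s nome : String) (h : nome ≠ "") : pvExtB s nome ≠ "" := by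
  unfold pvExtB
  split_ifs with hs
  · exact h
  · intro hc
    have : (s ++ ", " ++ nome).toList = ([] : List Char) := by rw [hc]; rfl
    simp at this

-- folding pvExtB from a nonempty start equals ", ".join with the start prepended
theorem pvExtB_fold_join (ns : List String) (hns : ∀ n ∈ ns, n ≠ "") :
    ∀ s : String, s ≠ "" → ns.foldl pvExtB s = PySem.Str.join ", " (s :: ns) := by
  induction ns with
  | nil =>
      intro s _
      apply String.toList_injective
      simp [PySem.Str.join, PySem.Chars.join_singleton]
  | cons n rest ih =>
      intro s hs
      have hn : n ≠ "" := hns n (by simp)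
      have hrest : ∀ m ∈ rest, m ≠ "" := fun m hm => hns m (by simp [hm])
      have h1 : rest.foldl pvExtB (pvExtB s n) = PySem.Str.join ", " (pvExtB s n :: rest) :=
        ih hrest (pvExtB s n) (pvExtB_ne_empty s n hn)
      simp only [List.foldl_cons, h1]
      apply String.toList_injective
      simp only [PySem.Str.toList_join, List.map_cons, pvExtB, if_neg hs]
      cases rest with
      | nil => simp [PySem.Chars.join_singleton, PySem.Chars.join_cons_cons]
      | cons m t => simp [PySem.Chars.join_cons_cons, List.append_assoc]

theorem pvExtB_fold_join_empty (ns : List String) (hns : ∀ n ∈ ns, n ≠ "") :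
    ns.foldl pvExtB "" = PySem.Str.join ", " ns := by
  cases ns with
  | nil => rfl
  | cons n rest =>
      have hn : n ≠ "" := hns n (by simp)
      have hrest : ∀ m ∈ rest, m ≠ "" := fun m hm => hns m (by simp [hm])
      simp only [List.foldl_cons]
      have : pvExtB "" n = n := by simp [pvExtB]
      rw [this, pvExtB_fold_join rest hrest n hn]

-- B's loop computes, for each polo, the fold of pvExtB over that polo's nonempty names
theorem pvNames_cons (k : String) (p : List (String × String)) (rest : List (List (String × String))) :
    pvNames k (p :: rest)
      = if pvPoloA p = k ∧ pvNomeA p ≠ "" then pvNomeA p :: pvNames k rest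
        else pvNames k rest := by
  unfold pvNames
  rw [List.filter_cons]
  by_cases hpolo : pvPoloA p = k
  · rw [if_pos (by simp [hpolo]), List.map_cons, List.filter_cons]
    by_cases hnome : pvNomeA p = ""
    · simp [hpolo, hnome]
    · simp [hpolo, hnome]
  · rw [if_neg (by simp [hpolo])]
    simp [hpolo]

theorem pvStepB_fold (partes : List (List (String × String))) :
    ∀ acc : String × String,
      partes.foldl pvStepB acc
        = ((pvNames "AT" partes).foldl pvExtB acc.1, (pvNames "PA" partes).foldl pvExtB acc.2) := by
  induction partes with
  | nil => intro acc; simp [pvNames]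
  | cons p rest ih =>
      intro acc
      simp only [List.foldl_cons, ih, pvNames_cons]
      by_cases hnome : ((PySem.Dict.mk p).get? "nome").getD "" = ""
      · simp [pvStepB, pvNomeA, pvPoloA, hnome]
      · by_cases hAT : PySem.Str.upper (((PySem.Dict.mk p).get? "polo").getD "") = "AT"
        · simp [pvStepB, pvNomeA, pvPoloA, hnome, hAT]
        · by_cases hPA : PySem.Str.upper (((PySem.Dict.mk p).get? "polo").getD "") = "PA"
          · simp [pvStepB, pvNomeA, pvPoloA, hnome, hPA]
          · simp [pvStepB, pvNomeA, pvPoloA, hnome, hAT, hPA]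

theorem pvNames_all_ne (k : String) (partes : List (List (String × String))) :
    ∀ n ∈ pvNames k partes, n ≠ "" := by
  intro n hn
  simp [pvNames, List.mem_filter] at hn
  exact hn.2

-- ===== VERDICT (by name: the statement is the Claim_ definition above) =====
theorem extrair_partes_py_spec : Claim_equal_extrair_partes_py := by
  intro proc_jud _
  unfold Spec_extrair_partes_py
  show extrair_partes_py proc_jud = extrair_partes_py_alt proc_jud
  unfold extrair_partes_py extrair_partes_py_alt pvJoinOrND_A
  simp only [pvStepB_fold]
  rw [pvExtB_fold_join_empty _ (pvNames_all_ne "AT" _),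
      pvExtB_fold_join_empty _ (pvNames_all_ne "PA" _)]
  rfl
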